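-- pv_equiv track=rewrite | github.com/OpenKBC/multiple_sclerosis_proj | aws_module/lambda_deployment/lambda_functions/spliceColumns.py | samplespliter
-- ===== SOURCE A (Python) =====
-- def samplespliter(header,index,value,cut_element):
--     """
--     Sample splitter by using upstream lists
--     input: header list, index list, value nested list, cut interval
--     output: list of outputfile(string format)
--     """
--     result = []
--     for i in range(0, len(header), cut_element):
--         block_result = []
--         block_result.append(","+",".join(header[i:i+cut_element])) # attach header
--         for idx, val in zip(index, value):
--             block_result.append(",".join([idx]+val[i:i+cut_element])) # attach header
--
--         block_result = "\n".join(block_result)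
--         result.append(block_result)
--
--     return result
-- ===== SOURCE B (Python) =====
-- def samplespliter(header, index, value, cut_element):
--     """Chunk-based rebuild: header and every row are pre-split into blocks once
--     by repeated take/drop (no start-index arithmetic), then each output file is
--     assembled from the k-th chunk of each row.  cut_element = 0 (where A raises
--     ValueError) is outside the claim; a negative cut yields no blocks."""
--     if cut_element <= 0:
--         return []
--
--     def chunks(lst):
--         out = []
--         while lst:
--             out.append(lst[:cut_element])
--             lst = lst[cut_element:]
--         return out
--
--     head_blocks = chunks(header)
--     rows = [(idx, chunks(val)) for idx, val in zip(index, value)]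
--
--     return ["\n".join(
--                 ["," + ",".join(hb)] +
--                 [",".join([idx] + (rcs[k] if k < len(rcs) else []))
--                  for idx, rcs in rows])
--             for k, hb in enumerate(head_blocks)]
-- ===== Notes on version B (the rewrite author's own statement) =====
-- stated objective: alternative
-- what changed: Instead of A's start-index arithmetic (outer loop over range(0, len(header), cut) with val[i:i+cut] slices inside a nested loop), B pre-splits the header and every row once into chunks by repeated take/drop, then assembles each output file from the k-th chunk of each pre-chunked row.
import Mathlib
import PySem

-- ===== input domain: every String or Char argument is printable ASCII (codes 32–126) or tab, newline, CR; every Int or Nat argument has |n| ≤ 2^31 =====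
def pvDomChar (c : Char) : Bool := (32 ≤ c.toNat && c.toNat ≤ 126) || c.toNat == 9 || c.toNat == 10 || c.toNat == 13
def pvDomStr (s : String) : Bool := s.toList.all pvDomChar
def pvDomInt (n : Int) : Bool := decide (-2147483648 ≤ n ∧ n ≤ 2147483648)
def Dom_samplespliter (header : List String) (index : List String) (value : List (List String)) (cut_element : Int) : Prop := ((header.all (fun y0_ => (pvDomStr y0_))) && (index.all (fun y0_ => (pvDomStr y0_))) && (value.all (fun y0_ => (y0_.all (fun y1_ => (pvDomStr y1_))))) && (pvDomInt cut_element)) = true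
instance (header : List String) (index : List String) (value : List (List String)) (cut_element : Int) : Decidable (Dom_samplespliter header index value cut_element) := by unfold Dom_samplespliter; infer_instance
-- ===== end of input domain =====

-- B pre-splits the header and every row into chunks once by repeated take/drop and then
-- assembles each output file from the k-th chunk of each row, instead of A's start-index
-- arithmetic with slices inside a nested loop; objective: alternative decomposition (same cost).

-- ===== PORT A =====
def samplespliter (header : List String) (index : List String) (value : List (List String)) (cut_element : Int) : List String :=
  (PySem.List.pyRange 0 (header.length : Int) cut_element).foldl (fun result i =>
    let block0 : List String :=
      [] ++ ["," ++ PySem.Str.join "," (PySem.List.slice header (some i) (some (i + cut_element)))]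
    let block := (index.zip value).foldl (fun br p =>
      br ++ [PySem.Str.join "," (p.1 :: PySem.List.slice p.2 (some i) (some (i + cut_element)))]) block0
    result ++ [PySem.Str.join "\n" block]) []

-- ===== PORT B =====
-- chunksB c l = Source B's chunks(l) with chunk size c+1 ('lst[:cut]' = take (c+1), 'lst[cut:]' =
-- drop (c+1); the '+1' keeps the chunk size positive so the take/drop recursion terminates;
-- B calls it with c = cut_element.toNat - 1, i.e. chunk size cut_element).
def chunksB {α : Type} (c : Nat) : List α → List (List α)
  | [] => []
  | x :: xs => ((x :: xs).take (c + 1)) :: chunksB c ((x :: xs).drop (c + 1))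
  termination_by l => l.length
  decreasing_by simp

def samplespliter_alt (header : List String) (index : List String) (value : List (List String)) (cut_element : Int) : List String :=
  if cut_element ≤ 0 then []
  else
    let headBlocks := chunksB (cut_element.toNat - 1) header
    let rows := (index.zip value).map (fun p => (p.1, chunksB (cut_element.toNat - 1) p.2))
    (PySem.List.enumerate headBlocks).map (fun kh =>
      PySem.Str.join "\n"
        (["," ++ PySem.Str.join "," kh.2] ++
         rows.map (fun r => PySem.Str.join ","
           (r.1 :: (if kh.1 < (r.2.length : Int) then PySem.List.pyGetD r.2 kh.1 [] else [])))))

-- ===== PRECONDITION & SPEC =====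
-- Pre_ excludes only cut_element = 0, where Python's range(0, len, 0) raises ValueError in A.
def Pre_samplespliter (header : List String) (index : List String) (value : List (List String)) (cut_element : Int) : Prop := cut_element ≠ 0
instance (header : List String) (index : List String) (value : List (List String)) (cut_element : Int) : Decidable (Pre_samplespliter header index value cut_element) := by unfold Pre_samplespliter; infer_instance

def pvWitness_samplespliter : List String × List String × List (List String) × Int :=
  (["h1", "h2", "h3"], ["r1", "r2"], [["a", "b", "c"], ["d", "e", "f"]], 2)

def Spec_samplespliter (header : List String) (index : List String) (value : List (List String)) (cut_element : Int) (out : List String) : Prop := out = samplespliter_alt header index value cut_element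
instance (header : List String) (index : List String) (value : List (List String)) (cut_element : Int) (out : List String) : Decidable (Spec_samplespliter header index value cut_element out) := by unfold Spec_samplespliter; infer_instance

-- ===== CLAIM (what is proved, stated in full; the proofs are below) =====
def Claim_equal_samplespliter : Prop := ∀ (header : List String) (index : List String) (value : List (List String)) (cut_element : Int), Dom_samplespliter header index value cut_element → Pre_samplespliter header index value cut_element → Spec_samplespliter header index value cut_element (samplespliter header index value cut_element)

-- ===== LEMMAS AND PROOFS =====

-- number of chunks of chunk size c+1
theorem pvChunksLen {α : Type} (c : Nat) : ∀ (n : Nat) (l : List α), l.length ≤ n →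
    (chunksB c l).length = (l.length + c) / (c + 1) := by
  intro n
  induction n with
  | zero =>
    intro l hl
    cases l with
    | nil => simp [chunksB, Nat.div_eq_of_lt (by omega : c < c + 1)]
    | cons x xs => simp at hl
  | succ n ih =>
    intro l hl
    cases l with
    | nil => simp [chunksB, Nat.div_eq_of_lt (by omega : c < c + 1)]
    | cons x xs =>
      rw [chunksB]
      simp only [List.length_cons]
      rw [ih ((x :: xs).drop (c + 1)) (by
        simp only [List.length_drop, List.length_cons]
        simp only [List.length_cons] at hl
        omega)]
      simp only [List.length_drop, List.length_cons]
      by_cases hc : c ≤ xs.length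
      · have h1 : xs.length + 1 - (c + 1) + c = xs.length := by omega
        have h2 : xs.length + 1 + c = xs.length + (c + 1) := by omega
        rw [h1, h2, Nat.add_div_right _ (by omega : 0 < c + 1)]
      · have h1 : xs.length + 1 - (c + 1) + c = c := by omega
        have h2 : xs.length + 1 + c = xs.length + (c + 1) := by omega
        rw [h1, h2, Nat.add_div_right _ (by omega : 0 < c + 1),
            Nat.div_eq_of_lt (by omega : c < c + 1),
            Nat.div_eq_of_lt (by omega : xs.length < c + 1)]

-- k-th chunk (default []) is the k-th aligned slice, for every k
theorem pvChunksGetD {α : Type} (c : Nat) : ∀ (k : Nat) (l : List α),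
    (chunksB c l).getD k [] = (l.drop (k * (c + 1))).take (c + 1) := by
  intro k
  induction k with
  | zero =>
    intro l
    cases l with
    | nil => simp [chunksB]
    | cons x xs => rw [chunksB]; simp
  | succ k ih =>
    intro l
    cases l with
    | nil => simp [chunksB]
    | cons x xs =>
      rw [chunksB]
      simp only [List.getD_cons_succ]
      rw [ih, List.drop_drop]
      congr 2
      ring

-- A's double append-fold written as a map over the block starts
theorem pvA_eq (h i : List String) (v : List (List String)) (c : Int) :
    samplespliter h i v c = (PySem.List.pyRange 0 (h.length : Int) c).map (fun s =>
      PySem.Str.join "\n" (("," ++ PySem.Str.join "," (PySem.List.slice h (some s) (some (s + c)))) ::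
        (i.zip v).map (fun p => PySem.Str.join "," (p.1 :: PySem.List.slice p.2 (some s) (some (s + c)))))) := by
  unfold samplespliter
  rw [PySem.List.foldl_append_singleton_eq_map, List.nil_append]
  apply List.map_congr_left
  intro s _
  dsimp only
  rw [PySem.List.foldl_append_singleton_eq_map, List.nil_append, List.singleton_append]

-- ===== VERDICT (by name: the statement is the Claim_ definition above) =====
theorem samplespliter_spec : Claim_equal_samplespliter := by
  intro h i v c _ hpre
  unfold Spec_samplespliter
  rcases lt_trichotomy c 0 with hneg | hz | hpos
  · rw [pvA_eq]
    have hr : PySem.List.pyRange 0 (h.length : Int) c = [] := by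
      simp [PySem.List.pyRange, hneg.ne, not_lt_of_gt hneg]
    rw [hr]
    simp [samplespliter_alt, hneg.le]
  · exact absurd hz hpre
  · -- positive step
    obtain ⟨cn, hcast⟩ : ∃ cn : Nat, (cn : Int) = c := ⟨c.toNat, Int.toNat_of_nonneg hpos.le⟩
    subst hcast
    have hcn : 0 < cn := by exact_mod_cast hpos
    have hcc : cn - 1 + 1 = cn := by omega
    rw [pvA_eq]
    unfold samplespliter_alt
    rw [if_neg (by omega)]
    dsimp only
    simp only [Int.toNat_natCast]
    rw [PySem.List.enumerate_eq_map_pyRange _ [], PySem.List.pyRange_one,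
        PySem.List.pyRange_of_pos 0 (h.length : Int) hpos,
        List.map_map, List.map_map, List.map_map]
    have hM : ((PySem.List.len (chunksB (cn - 1) h) : Int) - 0).toNat
        = (if (0:Int) < (h.length : Int) then (((h.length : Int) - 0 + (cn : Int) - 1) / (cn : Int)).toNat else 0) := by
      simp only [PySem.List.len_eq, Int.sub_zero, Int.toNat_natCast]
      rw [pvChunksLen (cn - 1) h.length h (le_refl _), hcc]
      by_cases h0 : h.length = 0
      · rw [h0, if_neg (by simp)]
        simp [Nat.div_eq_of_lt (by omega : cn - 1 < cn)]
      · have hpos0 := Nat.pos_of_ne_zero h0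
        rw [if_pos (by exact_mod_cast hpos0)]
        have e1 : (h.length : Int) + (cn : Int) - 1 = ((h.length + cn - 1 : Nat) : Int) := by omega
        rw [e1, ← Int.natCast_div, Int.toNat_natCast]
        congr 1
        omega
    rw [hM]
    apply List.map_congr_left
    intro k _
    have hhead : PySem.List.pyGetD (chunksB (cn - 1) h) ((k : Nat) : Int) []
        = (h.drop (k * cn)).take cn := by
      rw [PySem.List.pyGetD_natCast]
      have hg := pvChunksGetD (cn - 1) k h
      rwa [hcc] at hg
    have hcell : ∀ (l : List String),
        (if ((k : Nat) : Int) < ((chunksB (cn - 1) l).length : Int)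
         then PySem.List.pyGetD (chunksB (cn - 1) l) ((k : Nat) : Int) []
         else []) = (l.drop (k * cn)).take cn := by
      intro l
      split_ifs with hkl
      · rw [PySem.List.pyGetD_natCast]
        have hg := pvChunksGetD (cn - 1) k l
        rwa [hcc] at hg
      · have hk2 : (chunksB (cn - 1) l).length ≤ k := by exact_mod_cast not_lt.mp hkl
        have hlen := pvChunksLen (cn - 1) l.length l (le_refl _)
        rw [hcc] at hlen
        have hll : l.length ≤ k * cn := by
          by_contra hlt
          rw [Nat.not_le] at hlt
          have hkc : (k + 1) * cn = k * cn + cn := by ring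
          have : k + 1 ≤ (l.length + (cn - 1)) / cn :=
            (Nat.le_div_iff_mul_le (by omega : 0 < cn)).mpr (by omega)
          omega
        rw [List.drop_eq_nil_of_le hll]
        simp
    have hmul : (cn : Int) * ((k : Nat) : Int) = ((k * cn : Nat) : Int) := by
      push_cast; ring
    simp only [Function.comp_def, Function.comp_apply, zero_add, List.map_map,
      List.singleton_append, hmul, hcell, hhead, PySem.List.slice_natCast_add]
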